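-- pv_equiv track=rewrite | github.com/ylu999/jingu-swebench | scripts/jingu_adapter.py | _get_cv_stdout
-- ===== SOURCE A (Python) =====
-- def _get_cv_stdout(jingu_body: dict) -> tuple:
--     """
--     Extract stdout/stderr from the most recent controlled_fail_to_pass verify_history entry.
--     Returns (stdout, stderr). Both empty if not available.
--     """
--     verify_history = jingu_body.get("verify_history", [])
--     if not verify_history:
--         return "", ""
--     for entry in reversed(verify_history):
--         if entry.get("kind") == "controlled_fail_to_pass":
--             return entry.get("stdout", ""), entry.get("stderr", "")
--     for entry in reversed(verify_history):
--         if entry.get("kind") == "controlled_error":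
--             return entry.get("stdout", ""), entry.get("stderr", "")
--     for entry in reversed(verify_history):
--         if entry.get("stdout", ""):
--             return entry.get("stdout", ""), entry.get("stderr", "")
--     return "", ""
-- ===== SOURCE B (Python) =====
-- def _get_cv_stdout(jingu_body: dict) -> tuple:
--     """Single reverse pass with priority tracking instead of three reverse scans."""
--     ce = sd = None
--     for entry in reversed(jingu_body.get("verify_history", [])):
--         kind = entry.get("kind")
--         if kind == "controlled_fail_to_pass":
--             return entry.get("stdout", ""), entry.get("stderr", "")
--         if ce is None and kind == "controlled_error":
--             ce = entry
--         if sd is None and entry.get("stdout", ""):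
--             sd = entry
--     entry = ce if ce is not None else sd
--     if entry is not None:
--         return entry.get("stdout", ""), entry.get("stderr", "")
--     return "", ""
-- ===== Notes on version B (the rewrite author's own statement) =====
-- stated objective: alternative
-- what changed: Replaces A's three separate reverse scans of verify_history with one reverse pass that returns immediately on a controlled_fail_to_pass entry while remembering the first controlled_error and first truthy-stdout candidates.
import Mathlib
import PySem

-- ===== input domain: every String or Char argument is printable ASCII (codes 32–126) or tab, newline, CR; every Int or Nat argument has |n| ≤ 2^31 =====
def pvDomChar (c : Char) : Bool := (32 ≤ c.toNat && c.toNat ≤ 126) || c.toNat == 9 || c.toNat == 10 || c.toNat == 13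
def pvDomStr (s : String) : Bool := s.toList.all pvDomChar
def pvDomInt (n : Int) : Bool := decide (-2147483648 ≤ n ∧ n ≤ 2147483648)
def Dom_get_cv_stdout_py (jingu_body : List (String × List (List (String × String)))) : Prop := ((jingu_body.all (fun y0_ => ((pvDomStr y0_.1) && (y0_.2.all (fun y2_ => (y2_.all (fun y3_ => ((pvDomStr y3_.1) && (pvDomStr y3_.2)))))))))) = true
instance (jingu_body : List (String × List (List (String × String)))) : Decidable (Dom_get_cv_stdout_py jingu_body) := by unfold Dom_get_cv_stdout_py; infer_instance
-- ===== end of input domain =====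

-- ===== PORT A =====
-- B replaces A's three reverse scans with one priority-tracking reverse pass (alternative single-pass algorithm, same cost).
-- ===== PORT A =====
-- entry.get(k) / entry.get(k, "") on an association-list dict (first match)
def pvAget (d : List (String × String)) (k : String) : Option String :=
  (d.find? (fun p => p.1 == k)).map (·.2)

def pvOutOf (e : List (String × String)) : String × String :=
  ((pvAget e "stdout").getD "", (pvAget e "stderr").getD "")

-- first loop: first reversed entry with kind == "controlled_fail_to_pass"
def pvLoop1 : List (List (String × String)) → Option (String × String)
  | [] => none
  | e :: rest =>
      if pvAget e "kind" == some "controlled_fail_to_pass" then some (pvOutOf e)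
      else pvLoop1 rest

-- second loop: first reversed entry with kind == "controlled_error"
def pvLoop2 : List (List (String × String)) → Option (String × String)
  | [] => none
  | e :: rest =>
      if pvAget e "kind" == some "controlled_error" then some (pvOutOf e)
      else pvLoop2 rest

-- third loop: first reversed entry with truthy stdout
def pvLoop3 : List (List (String × String)) → Option (String × String)
  | [] => none
  | e :: rest =>
      if (pvAget e "stdout").getD "" ≠ "" then some (pvOutOf e)
      else pvLoop3 rest

def get_cv_stdout_py (jingu_body : List (String × List (List (String × String)))) : String × String :=
  let vh := ((jingu_body.find? (fun p => p.1 == "verify_history")).map (·.2)).getD []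
  if vh = [] then ("", "")
  else
    let r := vh.reverse
    match pvLoop1 r with
    | some p => p
    | none =>
      match pvLoop2 r with
      | some p => p
      | none =>
        match pvLoop3 r with
        | some p => p
        | none => ("", "")

-- ===== PORT B =====
-- one reverse pass: return at once on controlled_fail_to_pass, track first
-- controlled_error candidate (ce) and first truthy-stdout candidate (sd)
def pvAltLoop : List (List (String × String)) →
    Option (List (String × String)) → Option (List (String × String)) → String × String
  | [], ce, sd =>
      match ce.or sd with
      | some e => pvOutOf e
      | none => ("", "")
  | e :: rest, ce, sd =>
      let kind := pvAget e "kind"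
      if kind == some "controlled_fail_to_pass" then pvOutOf e
      else
        let ce' := if ce.isNone ∧ kind == some "controlled_error" then some e else ce
        let sd' := if sd.isNone ∧ (pvAget e "stdout").getD "" ≠ "" then some e else sd
        pvAltLoop rest ce' sd'

def get_cv_stdout_py_alt (jingu_body : List (String × List (List (String × String)))) : String × String :=
  pvAltLoop (((jingu_body.find? (fun p => p.1 == "verify_history")).map (·.2)).getD []).reverse none none

-- ===== PRECONDITION & SPEC =====
def Spec_get_cv_stdout_py (jingu_body : List (String × List (List (String × String)))) (out : String × String) : Prop := out = get_cv_stdout_py_alt jingu_body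
instance (jingu_body : List (String × List (List (String × String)))) (out : String × String) : Decidable (Spec_get_cv_stdout_py jingu_body out) := by unfold Spec_get_cv_stdout_py; infer_instance

-- ===== CLAIM (what is proved, stated in full; the proofs are below) =====
def Claim_equal_get_cv_stdout_py : Prop := ∀ (jingu_body : List (String × List (List (String × String)))), Dom_get_cv_stdout_py jingu_body → Spec_get_cv_stdout_py jingu_body (get_cv_stdout_py jingu_body)

-- ===== LEMMAS AND PROOFS =====
-- loop invariant: the single pass with accumulators ce, sd equals the cascade
-- loop1 > ce > loop2 > sd > loop3 on the remaining list
theorem pvAltLoop_inv (r : List (List (String × String)))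
    (ce sd : Option (List (String × String))) :
    pvAltLoop r ce sd =
      match pvLoop1 r with
      | some p => p
      | none =>
        match ce with
        | some e => pvOutOf e
        | none =>
          match pvLoop2 r with
          | some p => p
          | none =>
            match sd with
            | some e => pvOutOf e
            | none =>
              match pvLoop3 r with
              | some p => p
              | none => ("", "") := by
  induction r generalizing ce sd with
  | nil => cases ce <;> cases sd <;> simp [pvAltLoop, pvLoop1, pvLoop2, pvLoop3, Option.or]
  | cons e rest ih =>
      by_cases h1 : (pvAget e "kind" == some "controlled_fail_to_pass") = true
      · simp [pvAltLoop, pvLoop1, h1]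
      · have hA : pvAltLoop (e :: rest) ce sd = pvAltLoop rest
            (if ce.isNone ∧ (pvAget e "kind" == some "controlled_error") = true then some e else ce)
            (if sd.isNone ∧ (pvAget e "stdout").getD "" ≠ "" then some e else sd) := by
          simp [pvAltLoop, h1]
        rw [hA, ih]
        by_cases h2 : (pvAget e "kind" == some "controlled_error") = true <;>
        by_cases h3 : (pvAget e "stdout").getD "" ≠ "" <;>
        cases ce <;> cases sd <;>
          simp [pvLoop1, pvLoop2, pvLoop3, h1, h2, h3]

theorem pvAltLoop_nil_nil (r : List (List (String × String))) :
    pvAltLoop r none none =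
      match pvLoop1 r with
      | some p => p
      | none =>
        match pvLoop2 r with
        | some p => p
        | none =>
          match pvLoop3 r with
          | some p => p
          | none => ("", "") := by
  rw [pvAltLoop_inv]

-- ===== VERDICT (by name: the statement is the Claim_ definition above) =====
theorem get_cv_stdout_py_spec : Claim_equal_get_cv_stdout_py := by
  intro jb _
  unfold Spec_get_cv_stdout_py get_cv_stdout_py get_cv_stdout_py_alt
  rw [pvAltLoop_nil_nil]
  set vh := ((jb.find? (fun p => p.1 == "verify_history")).map (·.2)).getD [] with hvh
  by_cases h : vh = []
  · simp [h, pvLoop1, pvLoop2, pvLoop3]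
  · simp [h]
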